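-- pv_equiv track=rewrite | github.com/MLReef/mlreef | executable-pipeline-framework/vergeml/__main__.py | _forgive_wrong_option_order
-- ===== SOURCE A (Python) =====
-- from copy import deepcopy, copy
--
-- _VERGEML_OPTION_NAMES = {
--     'version', 'file', 'model', 'samples-dir', 'val-split', 'test-split', 'cache-dir',
--     'random-seed', 'trainings-dir', 'project-dir', 'cache', 'device', 'device-memory'
-- }
--
-- def _forgive_wrong_option_order(argv):
--     first_part = []
--     second_part = []
--     rest = copy(argv)
--
--     while rest:
--         arg = rest.pop(0)
--
--         if arg.startswith("--"):
--             argname = arg.lstrip("--")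
--             if "=" in argname:
--                 argname = argname.split("=")[0]
--             is_vergeml_opt = bool(argname in _VERGEML_OPTION_NAMES)
--             lst = (first_part if is_vergeml_opt else second_part)
--
--             if arg.endswith("=") or not "=" in arg:
--                 if not rest:
--                     # give up
--                     second_part.append(arg)
--                 else:
--                     lst.append(arg)
--                     lst.append(rest.pop(0))
--             else:
--                 lst.append(arg)
--
--         else:
--             second_part.append(arg)
--
--     return first_part + second_part
-- ===== SOURCE B (Python) =====
-- # B: two-pass decomposition — first tokenize argv into tagged units, then concatenate
-- # option-tagged units' tokens before the rest (same value as A; objective: alternative structure).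
--
-- _VERGEML_OPTION_NAMES = {
--     'version', 'file', 'model', 'samples-dir', 'val-split', 'test-split', 'cache-dir',
--     'random-seed', 'trainings-dir', 'project-dir', 'cache', 'device', 'device-memory'
-- }
--
--
-- def _is_vergeml(tok):
--     name = tok.lstrip("-")
--     if "=" in name:
--         name = name.split("=")[0]
--     return name in _VERGEML_OPTION_NAMES
--
--
-- def _forgive_wrong_option_order(argv):
--     units = []  # list of (is_vergeml_option, tokens)
--     i, n = 0, len(argv)
--     while i < n:
--         tok = argv[i]
--         if not tok.startswith("--"):
--             units.append((False, [tok]))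
--             i += 1
--         elif "=" in tok and not tok.endswith("="):
--             units.append((_is_vergeml(tok), [tok]))
--             i += 1
--         elif i + 1 < n:
--             units.append((_is_vergeml(tok), [tok, argv[i + 1]]))
--             i += 2
--         else:
--             units.append((False, [tok]))  # trailing flag with no value: give up
--             i += 1
--     return [t for ok, u in units if ok for t in u] + \
--            [t for ok, u in units if not ok for t in u]
-- ===== Notes on version B (the rewrite author's own statement) =====
-- stated objective: alternative
-- what changed: Replaces A's destructive while-pop loop that routes tokens into two accumulators by a two-pass decomposition: one index-driven pass tokenizes argv into tagged units (flag with inline value, flag plus consumed value, lone trailing flag, plain token), then a second pass concatenates option-tagged units' tokens before the rest.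
import Mathlib
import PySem

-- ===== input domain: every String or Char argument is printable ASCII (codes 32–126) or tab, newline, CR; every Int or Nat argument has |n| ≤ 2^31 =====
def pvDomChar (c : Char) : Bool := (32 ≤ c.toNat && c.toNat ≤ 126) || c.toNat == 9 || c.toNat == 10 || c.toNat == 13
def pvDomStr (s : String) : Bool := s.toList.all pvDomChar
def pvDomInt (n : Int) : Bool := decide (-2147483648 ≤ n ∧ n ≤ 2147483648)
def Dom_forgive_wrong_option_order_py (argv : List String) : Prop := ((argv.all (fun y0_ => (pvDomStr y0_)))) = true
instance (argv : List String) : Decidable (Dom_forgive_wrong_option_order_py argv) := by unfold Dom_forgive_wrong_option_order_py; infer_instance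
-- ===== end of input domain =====

-- B replaces A's single destructive while-pop loop with two accumulators by a two-pass
-- decomposition (tokenize argv into tagged units, then concatenate option units before the
-- rest); objective: alternative structure, same cost.

-- _VERGEML_OPTION_NAMES (a Python set of string literals; membership test only)
def pvOptionNames : List String :=
  ["version", "file", "model", "samples-dir", "val-split", "test-split", "cache-dir",
   "random-seed", "trainings-dir", "project-dir", "cache", "device", "device-memory"]

-- the identical name-extraction snippet both Pythons contain:
--   argname = arg.lstrip("--");  if "=" in argname: argname = argname.split("=")[0]
-- lstrip("--") removes the leading run of '-' characters: exact as dropWhile (· == '-').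
def pvArgName (arg : String) : String :=
  let argname := String.ofList (arg.toList.dropWhile (fun c => c == '-'))
  if PySem.Str.isIn "=" argname then
    ((PySem.Str.split? argname "=").getD []).getD 0 ""   -- split? is some (sep "=" ≠ ""); [0] exists
  else argname

-- ===== PORT A =====
-- the while-loop: rest (popped from the front), first_part and second_part accumulators
def pvLoopA : List String → List String → List String → List String × List String
  | [], first, second => (first, second)
  | arg :: rest, first, second =>
    if PySem.Str.startswith arg "--" then
      let isOpt := pvOptionNames.contains (pvArgName arg)
      if PySem.Str.endswith arg "=" || !PySem.Str.isIn "=" arg then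
        match rest with
        | [] => (first, second ++ [arg])        -- give up
        | v :: rest' =>
          if isOpt then pvLoopA rest' (first ++ [arg, v]) second
          else pvLoopA rest' first (second ++ [arg, v])
      else
        if isOpt then pvLoopA rest (first ++ [arg]) second
        else pvLoopA rest first (second ++ [arg])
    else
      pvLoopA rest first (second ++ [arg])

def forgive_wrong_option_order_py (argv : List String) : List String :=
  let p := pvLoopA argv [] []
  p.1 ++ p.2

-- ===== PORT B =====
-- first pass: tagged units (is_vergeml_option, tokens)
def pvUnitsB : List String → List (Bool × List String)
  | [] => []
  | tok :: rest =>
    if !PySem.Str.startswith tok "--" then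
      (false, [tok]) :: pvUnitsB rest
    else if PySem.Str.isIn "=" tok && !PySem.Str.endswith tok "=" then
      (pvOptionNames.contains (pvArgName tok), [tok]) :: pvUnitsB rest
    else
      match rest with
      | v :: rest' => (pvOptionNames.contains (pvArgName tok), [tok, v]) :: pvUnitsB rest'
      | [] => [(false, [tok])]                  -- trailing flag with no value: give up

-- second pass: option-tagged tokens first, then the rest
def forgive_wrong_option_order_py_alt (argv : List String) : List String :=
  ((pvUnitsB argv).filter (fun u => u.1)).flatMap (fun u => u.2) ++
  ((pvUnitsB argv).filter (fun u => !u.1)).flatMap (fun u => u.2)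

-- ===== PRECONDITION & SPEC =====
def Spec_forgive_wrong_option_order_py (argv : List String) (out : List String) : Prop := out = forgive_wrong_option_order_py_alt argv
instance (argv : List String) (out : List String) : Decidable (Spec_forgive_wrong_option_order_py argv out) := by unfold Spec_forgive_wrong_option_order_py; infer_instance

-- ===== CLAIM (what is proved, stated in full; the proofs are below) =====
def Claim_equal_forgive_wrong_option_order_py : Prop := ∀ (argv : List String), Dom_forgive_wrong_option_order_py argv → Spec_forgive_wrong_option_order_py argv (forgive_wrong_option_order_py argv)

-- ===== LEMMAS AND PROOFS =====
-- proof-only abbreviations for B's two output halves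
def pvOpt (l : List String) : List String :=
  ((pvUnitsB l).filter (fun u => u.1)).flatMap (fun u => u.2)
def pvNon (l : List String) : List String :=
  ((pvUnitsB l).filter (fun u => !u.1)).flatMap (fun u => u.2)

-- loop invariant: A's loop returns B's tokenization halves appended to the accumulators
lemma pvLoopA_eq (l : List String) : ∀ f s, pvLoopA l f s = (f ++ pvOpt l, s ++ pvNon l) := by
  suffices H : ∀ n (l : List String), l.length ≤ n → ∀ f s,
      pvLoopA l f s = (f ++ pvOpt l, s ++ pvNon l) from fun f s => H l.length l le_rfl f s
  intro n
  induction n with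
  | zero =>
    intro l hl f s
    have : l = [] := by cases l <;> simp_all
    subst this; simp [pvLoopA, pvUnitsB, pvOpt, pvNon]
  | succ n ih =>
    intro l hl f s
    match l with
    | [] => simp [pvLoopA, pvUnitsB, pvOpt, pvNon]
    | arg :: rest =>
      have hlenr : rest.length ≤ n := by simp at hl; omega
      cases rest with
      | nil =>
        by_cases hOpt : pvArgName arg ∈ pvOptionNames <;>
        cases h1 : PySem.Chars.startswith arg.toList ['-', '-'] <;>
        cases h2 : PySem.Chars.isIn ['='] arg.toList <;>
        cases h3 : PySem.Chars.endswith arg.toList ['='] <;>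
        simp [pvLoopA, pvUnitsB, pvOpt, pvNon, h1, h2, h3, hOpt]
      | cons v rest' =>
        have hlen' : rest'.length ≤ n := by simp at hl; omega
        by_cases hOpt : pvArgName arg ∈ pvOptionNames <;>
        cases h1 : PySem.Chars.startswith arg.toList ['-', '-'] <;>
        cases h2 : PySem.Chars.isIn ['='] arg.toList <;>
        cases h3 : PySem.Chars.endswith arg.toList ['='] <;>
        simp [pvLoopA, pvUnitsB, pvOpt, pvNon, h1, h2, h3, hOpt, ih _ hlenr, ih _ hlen']

-- ===== VERDICT (by name: the statement is the Claim_ definition above) =====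
theorem forgive_wrong_option_order_py_spec : Claim_equal_forgive_wrong_option_order_py := by
  intro argv _
  unfold Spec_forgive_wrong_option_order_py forgive_wrong_option_order_py forgive_wrong_option_order_py_alt
  rw [pvLoopA_eq]
  simp [pvOpt, pvNon]
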